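-- pv_equiv track=rewrite | github.com/Penjo989/Project-Euler | Useful funcs/pascal calc.py | calc
-- ===== SOURCE A (Python) =====
-- def calc(n):
--     j = 1
--     sum = 0
--     while True:
--         if n < (7 ** j):
--             break
--         b = n % (7 ** j)
--         sum += n - b
--         for i in range(b + 1):
--             sum -= (n - i) // (7 ** j)
--         j += 1
--     return sum
-- ===== SOURCE B (Python) =====
-- def calc(n):
--     total = 0
--     p = 7
--     while p <= n:
--         b = n % p
--         total += n - b - (b + 1) * (n // p)
--         p *= 7
--     return total
-- ===== Notes on version B (the rewrite author's own statement) =====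
-- stated objective: faster
-- what changed: Replaced the inner loop that subtracts a floor quotient once per i in range(b + 1) with the closed form (b + 1) * (n // p), valid because every term in that range has the same floor quotient; only the outer loop over base-seven place values remains.
import Mathlib
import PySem

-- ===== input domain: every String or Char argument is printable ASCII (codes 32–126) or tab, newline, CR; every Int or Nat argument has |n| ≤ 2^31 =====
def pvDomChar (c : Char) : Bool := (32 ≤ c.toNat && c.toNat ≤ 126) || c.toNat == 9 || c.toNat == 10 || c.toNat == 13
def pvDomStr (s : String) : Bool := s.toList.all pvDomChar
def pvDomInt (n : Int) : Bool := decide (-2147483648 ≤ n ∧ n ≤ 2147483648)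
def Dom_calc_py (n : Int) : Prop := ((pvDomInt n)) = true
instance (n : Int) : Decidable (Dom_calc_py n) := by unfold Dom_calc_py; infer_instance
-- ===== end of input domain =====

-- B replaces A's inner O(7^j)-iteration subtraction loop with the closed form
-- (b+1)*(n//7^j), turning the O(n) total work into O(log n); same return value.

-- ===== PORT A =====
-- while-True loop of A, one recursive step per iteration; fuel bounds the number
-- of iterations (the loop runs at most log_7 n + 1 times, far below natAbs n + 1).
def calcLoopA (n : Int) (fuel : Nat) (j : Nat) (sum : Int) : Int :=
  match fuel with
  | 0 => sum
  | fuel + 1 =>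
    if n < (7:Int) ^ j then sum
    else
      let b := PySem.Int.mod n ((7:Int) ^ j)
      let sum1 := sum + (n - b)
      let sum2 := (PySem.List.pyRange 0 (b + 1) 1).foldl
        (fun s i => s - PySem.Int.floordiv (n - i) ((7:Int) ^ j)) sum1
      calcLoopA n fuel (j + 1) sum2

def calc_py (n : Int) : Int := calcLoopA n (n.natAbs + 1) 1 0

-- ===== PORT B =====
def calcLoopB (n : Int) (fuel : Nat) (p : Int) (total : Int) : Int :=
  match fuel with
  | 0 => total
  | fuel + 1 =>
    if p ≤ n then
      calcLoopB n fuel (p * 7)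
        (total + (n - PySem.Int.mod n p
          - (PySem.Int.mod n p + 1) * PySem.Int.floordiv n p))
    else total

def calc_py_alt (n : Int) : Int := calcLoopB n (n.natAbs + 1) 7 0

-- ===== PRECONDITION & SPEC =====
def Spec_calc_py (n : Int) (out : Int) : Prop := out = calc_py_alt n
instance (n : Int) (out : Int) : Decidable (Spec_calc_py n out) := by unfold Spec_calc_py; infer_instance

-- ===== CLAIM (what is proved, stated in full; the proofs are below) =====
def Claim_equal_calc_py : Prop := ∀ (n : Int), Dom_calc_py n → Spec_calc_py n (calc_py n)

-- ===== LEMMAS AND PROOFS =====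

-- fold of a constant-valued subtraction over a list
theorem foldl_sub_const {g : Int → Int} {c : Int} :
    ∀ (l : List Int) (s : Int), (∀ i ∈ l, g i = c) →
      l.foldl (fun s i => s - g i) s = s - (l.length : Int) * c := by
  intro l
  induction l with
  | nil => intro s _; simp
  | cons a t ih =>
    intro s h
    simp only [List.foldl_cons, List.length_cons]
    rw [ih _ (fun i hi => h i (List.mem_cons_of_mem a hi)), h a (by simp)]
    push_cast
    ring

-- for 0 ≤ i ≤ n % p (p > 0, p ≤ n): (n - i) // p = n // p
theorem fdiv_shift_eq {n p i : Int} (hp : 0 < p) (h0 : 0 ≤ i) (hb : i ≤ n % p) :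
    (n - i) / p = n / p := by
  have hmod : n % p = n - p * (n / p) := by rw [Int.emod_def]
  have hc : p * (n / p) = n / p * p := mul_comm _ _
  have hlt : n % p < p := Int.emod_lt_of_pos n hp
  have hr : n - i = (n % p - i) + (n / p) * p := by omega
  rw [hr, Int.add_mul_ediv_right _ _ (by omega : p ≠ 0),
      Int.ediv_eq_zero_of_lt (by omega) (by omega)]
  simp

-- the body of one A-iteration equals the body of one B-iteration
theorem step_eq (n : Int) (j : Nat) (sum : Int) (_hle : (7:Int) ^ j ≤ n) :
    (PySem.List.pyRange 0 (PySem.Int.mod n ((7:Int) ^ j) + 1) 1).foldl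
        (fun s i => s - PySem.Int.floordiv (n - i) ((7:Int) ^ j))
        (sum + (n - PySem.Int.mod n ((7:Int) ^ j)))
      = sum + (n - PySem.Int.mod n ((7:Int) ^ j)
          - (PySem.Int.mod n ((7:Int) ^ j) + 1) * PySem.Int.floordiv n ((7:Int) ^ j)) := by
  have hp : (0:Int) < 7 ^ j := by positivity
  rw [PySem.Int.mod_eq_emod_of_pos hp]
  have hb0 : 0 ≤ n % 7 ^ j := Int.emod_nonneg n (by positivity)
  rw [foldl_sub_const _ _ (fun i hi => by
        rw [PySem.List.mem_pyRange_one] at hi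
        rw [PySem.Int.floordiv_eq_ediv_of_pos hp]
        exact fdiv_shift_eq hp hi.1 (by omega))]
  rw [PySem.Int.floordiv_eq_ediv_of_pos hp]
  rw [PySem.List.length_pyRange_one]
  have : ((n % 7 ^ j + 1 - 0).toNat : Int) = n % 7 ^ j + 1 := by omega
  rw [this]
  ring

-- both loops agree, step for step (B's p is A's 7^j)
theorem loops_eq (n : Int) : ∀ (fuel : Nat) (j : Nat) (sum : Int),
    calcLoopA n fuel j sum = calcLoopB n fuel ((7:Int) ^ j) sum := by
  intro fuel
  induction fuel with
  | zero => intro j sum; rfl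
  | succ fuel ih =>
    intro j sum
    simp only [calcLoopA, calcLoopB]
    by_cases h : n < (7:Int) ^ j
    · rw [if_pos h, if_neg (by omega)]
    · rw [if_neg h, if_pos (by omega)]
      rw [step_eq n j sum (by omega)]
      rw [ih (j + 1)]
      ring_nf

-- ===== VERDICT (by name: the statement is the Claim_ definition above) =====
theorem calc_py_spec : Claim_equal_calc_py := by
  intro n _
  unfold Spec_calc_py calc_py calc_py_alt
  have := loops_eq n (n.natAbs + 1) 1 0
  simpa using this
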